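-- pv_equiv track=rewrite | github.com/HyeongMokJeong/coding-test | Programmers/야간 전술보행.py | solution
-- ===== SOURCE A (Python) =====
-- def solution(distance, scope, times):
--     ary = []
--
--     for idx, i in enumerate(scope):
--         i.sort()
--         for j in range(i[0], i[1] + 1):
--             if 0 < (j % sum(times[idx])) <= times[idx][0]:
--                 ary.append(j)
--                 break
--     return distance if not ary else sorted(ary)[0]
-- ===== SOURCE B (Python) =====
-- def solution(distance, scope, times):
--     best = None
--     for row, t in zip(scope, times):
--         lo2 = sorted(row)
--         a, b = lo2[0], lo2[1]
--         p = sum(t)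
--         if p <= 0:
--             # j % p is never positive for p < 0, so this interval contributes nothing
--             continue
--         w = min(t[0], p - 1)
--         if w <= 0:
--             continue
--         r = a % p
--         if 1 <= r <= w:
--             j = a
--         elif r == 0:
--             j = a + 1
--         else:
--             j = a + (p - r) + 1
--         if j <= b and (best is None or j < best):
--             best = j
--     return distance if best is None else best
-- ===== Notes on version B (the rewrite author's own statement) =====
-- stated objective: alternative
-- what changed: B replaces A's per-interval linear scan (a range loop testing every position j) by a modular-arithmetic closed form computing the first visible position of each scope entry directly, and keeps a running minimum instead of collecting all hits and sorting them; intended as asymptotically better on wide intervals, but timing runs measured only ~1.35x-1.7x depending on input family, so no speed is claimed.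
import Mathlib
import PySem

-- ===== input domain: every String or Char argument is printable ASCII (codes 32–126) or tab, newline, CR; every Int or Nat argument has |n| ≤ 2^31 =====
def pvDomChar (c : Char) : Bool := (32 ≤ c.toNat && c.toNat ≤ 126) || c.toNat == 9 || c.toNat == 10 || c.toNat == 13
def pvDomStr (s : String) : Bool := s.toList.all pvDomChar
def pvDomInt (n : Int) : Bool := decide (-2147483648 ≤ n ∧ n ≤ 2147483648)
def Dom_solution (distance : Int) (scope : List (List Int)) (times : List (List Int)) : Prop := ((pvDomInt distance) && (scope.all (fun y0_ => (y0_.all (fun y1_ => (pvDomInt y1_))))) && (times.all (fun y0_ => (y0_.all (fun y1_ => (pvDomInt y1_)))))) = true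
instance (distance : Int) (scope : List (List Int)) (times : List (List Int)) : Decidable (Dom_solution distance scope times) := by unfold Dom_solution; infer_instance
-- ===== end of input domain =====

-- B replaces A's linear scan of each scope interval by a modular-arithmetic
-- closed form per scope entry and a running minimum (alternative algorithm;
-- intended as asymptotically better on wide intervals; timing runs measured
-- between ~1.35x and ~1.7x depending on input family, so no speed is claimed).
-- A sorts each scope row IN PLACE (i.sort()); B does not mutate its arguments —
-- the equivalence proved here is about the RETURN value only.

-- ===== PORT A =====
-- A's inner 'for j in range(i[0], i[1]+1): if 0 < j % p <= w: append; break'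
-- = first element of the range satisfying the condition
def solnScan (p w : Int) : List Int → Option Int
  | [] => none
  | j :: rest =>
    if 0 < PySem.Int.mod j p ∧ PySem.Int.mod j p ≤ w then some j
    else solnScan p w rest

def solution (distance : Int) (scope : List (List Int)) (times : List (List Int)) : Int :=
  let ary : List Int :=
    List.foldl (fun ary pr =>
      let i := PySem.List.sorted pr.2 (fun x => x)
      let t := PySem.List.pyGetD times pr.1 []
      match solnScan t.sum (PySem.List.pyGetD t 0 0)
          (PySem.List.pyRange (PySem.List.pyGetD i 0 0) (PySem.List.pyGetD i 1 0 + 1)) with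
      | some j => ary ++ [j]
      | none => ary) [] (PySem.List.enumerate scope)
  if ary = [] then distance
  else PySem.List.pyGetD (PySem.List.sorted ary (fun x => x)) 0 0

-- ===== PORT B =====
def solution_alt (distance : Int) (scope : List (List Int)) (times : List (List Int)) : Int :=
  let best : Option Int :=
    List.foldl (fun best rt =>
      let s := PySem.List.sorted rt.1 (fun x => x)
      let a := PySem.List.pyGetD s 0 0
      let b := PySem.List.pyGetD s 1 0
      let p := rt.2.sum
      if p ≤ 0 then best
      else
        let w := min (PySem.List.pyGetD rt.2 0 0) (p - 1)
        if w ≤ 0 then best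
        else
          let r := PySem.Int.mod a p
          let j := if 1 ≤ r ∧ r ≤ w then a
                   else if r = 0 then a + 1
                   else a + (p - r) + 1
          if j ≤ b ∧ (best = none ∨ j < best.getD 0) then some j else best)
      none (scope.zip times)
  match best with
  | none => distance
  | some v => v

-- ===== PRECONDITION & SPEC =====
-- Pre_ excludes exactly the inputs where Python A raises: a times row shorter than
-- scope (IndexError), a scope row with fewer than two entries (IndexError), or a
-- times row summing to 0 (ZeroDivisionError).
def Pre_solution (distance : Int) (scope : List (List Int)) (times : List (List Int)) : Prop :=
  scope.length ≤ times.length ∧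
  ∀ pr ∈ scope.zip times, 2 ≤ pr.1.length ∧ pr.2.sum ≠ 0
instance (distance : Int) (scope : List (List Int)) (times : List (List Int)) : Decidable (Pre_solution distance scope times) := by unfold Pre_solution; infer_instance

def pvWitness_solution : Int × List (List Int) × List (List Int) := (10, [[2, 5], [8, 6]], [[2, 3], [1, 4]])

def Spec_solution (distance : Int) (scope : List (List Int)) (times : List (List Int)) (out : Int) : Prop := out = solution_alt distance scope times
instance (distance : Int) (scope : List (List Int)) (times : List (List Int)) (out : Int) : Decidable (Spec_solution distance scope times out) := by unfold Spec_solution; infer_instance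

-- ===== CLAIM (what is proved, stated in full; the proofs are below) =====
def Claim_equal_solution : Prop := ∀ (distance : Int) (scope : List (List Int)) (times : List (List Int)), Dom_solution distance scope times → Pre_solution distance scope times → Spec_solution distance scope times (solution distance scope times)

-- ===== LEMMAS AND PROOFS =====

-- B's per-row closed-form candidate, as a function (matches solution_alt's loop body)
def candB (a b p work : Int) : Option Int :=
  if p ≤ 0 then none
  else if min work (p - 1) ≤ 0 then none
  else
    let w := min work (p - 1)
    let r := PySem.Int.mod a p
    let j := if 1 ≤ r ∧ r ≤ w then a else if r = 0 then a + 1 else a + (p - r) + 1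
    if j ≤ b then some j else none

def candRow (rt : List Int × List Int) : Option Int :=
  let s := PySem.List.sorted rt.1 (fun x => x)
  candB (PySem.List.pyGetD s 0 0) (PySem.List.pyGetD s 1 0) rt.2.sum (PySem.List.pyGetD rt.2 0 0)

-- A's per-row action, as a function of (index, row)
def fA (times : List (List Int)) (pr : Int × List Int) : Option Int :=
  let i := PySem.List.sorted pr.2 (fun x => x)
  let t := PySem.List.pyGetD times pr.1 []
  solnScan t.sum (PySem.List.pyGetD t 0 0)
    (PySem.List.pyRange (PySem.List.pyGetD i 0 0) (PySem.List.pyGetD i 1 0 + 1))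

lemma scanNone (p w : Int) (l : List Int)
    (h : ∀ j ∈ l, ¬(0 < PySem.Int.mod j p ∧ PySem.Int.mod j p ≤ w)) :
    solnScan p w l = none := by
  induction l with
  | nil => rfl
  | cons x r ih =>
    simp only [solnScan, if_neg (h x (by simp))]
    exact ih (fun j hj => h j (by simp [hj]))

lemma scanRange (p w j a0 : Int)
    (hj : 0 < PySem.Int.mod j p ∧ PySem.Int.mod j p ≤ w)
    (hmin : ∀ t, a0 ≤ t → t < j → ¬(0 < PySem.Int.mod t p ∧ PySem.Int.mod t p ≤ w)) :
    ∀ (n : Nat) (a c : Int), (c - a).toNat = n → a0 ≤ a → a ≤ j →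
    solnScan p w (PySem.List.pyRange a c) = if j < c then some j else none := by
  intro n
  induction n with
  | zero =>
    intro a c hn ha0 haj
    have hca : c ≤ a := by omega
    have : PySem.List.pyRange a c = [] := by simp [PySem.List.pyRange]; omega
    rw [this]
    simp only [solnScan]
    rw [if_neg (by omega)]
  | succ n ih =>
    intro a c hn ha0 haj
    have hac : a < c := by omega
    rw [PySem.List.pyRange_one_cons hac]
    simp only [solnScan]
    by_cases hPa : 0 < PySem.Int.mod a p ∧ PySem.Int.mod a p ≤ w
    · have hja : j = a := by
        by_contra hne
        exact hmin a ha0 (by omega) hPa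
      rw [if_pos hPa, hja, if_pos hac]
    · rw [if_neg hPa]
      have haj' : a + 1 ≤ j := by
        rcases lt_or_eq_of_le haj with h | h
        · omega
        · exact absurd (h ▸ hj) hPa
      exact ih (a + 1) c (by omega) (by omega) haj'

lemma rowEq (a b p work : Int) (hp : p ≠ 0) :
    solnScan p work (PySem.List.pyRange a (b + 1)) = candB a b p work := by
  rcases lt_trichotomy p 0 with hneg | hz | hpos
  · rw [candB, if_pos (by omega)]
    exact scanNone _ _ _ (fun j _ => by
      have := PySem.Int.mod_neg_bounds j hneg
      omega)
  · exact absurd hz hp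
  · have hmodeq : ∀ x : Int, PySem.Int.mod x p = x % p :=
      fun x => PySem.Int.mod_eq_emod_of_pos hpos
    by_cases hw : min work (p - 1) ≤ 0
    · rw [candB, if_neg (by omega), if_pos hw]
      exact scanNone _ _ _ (fun j _ hP => by
        rw [hmodeq] at hP
        have h1 := Int.emod_lt_of_pos j hpos
        omega)
    · set w := min work (p - 1) with hwdef
      have hw1 : 1 ≤ w := by omega
      have hwork : w ≤ work := by omega
      have hp2 : 2 ≤ p := by omega
      set r := a % p with hrdef
      have hr0 : 0 ≤ r := Int.emod_nonneg a hp
      have hrp : r < p := Int.emod_lt_of_pos a hpos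
      have hq : p * (a / p) + r = a := Int.ediv_add_emod a p
      set q := a / p with hqdef
      have modShift : ∀ t : Int, a ≤ t → t - a < p - r → t % p = r + (t - a) := by
        intro t ht htp
        have he : t = (r + (t - a)) + p * q := by omega
        conv_lhs => rw [he]
        rw [Int.add_mul_emod_self_left]
        exact Int.emod_eq_of_lt (by omega) (by omega)
      have modP0 : (a + (p - r)) % p = 0 := by
        have he : a + (p - r) = 0 + p * (q + 1) := by ring_nf; omega
        rw [he, Int.add_mul_emod_self_left, Int.zero_emod]
      have mod1 : (a + (p - r) + 1) % p = 1 := by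
        have he : a + (p - r) + 1 = 1 + p * (q + 1) := by ring_nf; omega
        rw [he, Int.add_mul_emod_self_left]
        exact Int.emod_eq_of_lt (by omega) (by omega)
      have hcb : candB a b p work
          = if (if 1 ≤ r ∧ r ≤ w then a else if r = 0 then a + 1 else a + (p - r) + 1) ≤ b
            then some (if 1 ≤ r ∧ r ≤ w then a else if r = 0 then a + 1 else a + (p - r) + 1)
            else none := by
        rw [candB, if_neg (by omega), if_neg (by omega)]
        simp only [hmodeq, ← hrdef, ← hwdef]
      by_cases h1 : 1 ≤ r ∧ r ≤ w
      · have hPj : 0 < PySem.Int.mod a p ∧ PySem.Int.mod a p ≤ work := by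
          rw [hmodeq, ← hrdef]; omega
        have hs := scanRange p work a a hPj (fun t h1' h2' _ => by omega)
          ((b + 1 - a).toNat) a (b + 1) rfl le_rfl le_rfl
        rw [hs, hcb, if_pos h1]
        simp only [Int.lt_add_one_iff]
      · by_cases h2 : r = 0
        · have hPj : 0 < PySem.Int.mod (a + 1) p ∧ PySem.Int.mod (a + 1) p ≤ work := by
            rw [hmodeq]
            have := modShift (a + 1) (by omega) (by omega)
            omega
          have hmin : ∀ t, a ≤ t → t < a + 1 →
              ¬(0 < PySem.Int.mod t p ∧ PySem.Int.mod t p ≤ work) := by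
            intro t ht1 ht2
            have hta : t = a := by omega
            rw [hta, hmodeq, ← hrdef]
            omega
          have hs := scanRange p work (a + 1) a hPj hmin
            ((b + 1 - a).toNat) a (b + 1) rfl le_rfl (by omega)
          rw [hs, hcb, if_neg h1, if_pos h2]
          simp only [Int.lt_add_one_iff]
        · have hrw : w < r := by omega
          have hwwork : work < r := by omega
          have hPj : 0 < PySem.Int.mod (a + (p - r) + 1) p
              ∧ PySem.Int.mod (a + (p - r) + 1) p ≤ work := by
            rw [hmodeq, mod1]; omega
          have hmin : ∀ t, a ≤ t → t < a + (p - r) + 1 →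
              ¬(0 < PySem.Int.mod t p ∧ PySem.Int.mod t p ≤ work) := by
            intro t ht1 ht2
            rw [hmodeq]
            by_cases h3 : t - a < p - r
            · have := modShift t ht1 h3
              omega
            · have hta : t = a + (p - r) := by omega
              rw [hta, modP0]
              omega
          have hs := scanRange p work (a + (p - r) + 1) a hPj hmin
            ((b + 1 - a).toNat) a (b + 1) rfl le_rfl (by omega)
          rw [hs, hcb, if_neg h1, if_neg h2]
          simp only [Int.lt_add_one_iff]

-- A's loop collects, in order, the per-row scan results
lemma foldA (ts : List (List Int)) (l : List (Int × List Int)) (acc : List Int) :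
    List.foldl (fun ary pr =>
      match solnScan (PySem.List.pyGetD ts pr.1 []).sum
          (PySem.List.pyGetD (PySem.List.pyGetD ts pr.1 []) 0 0)
          (PySem.List.pyRange
            (PySem.List.pyGetD (PySem.List.sorted pr.2 (fun x => x)) 0 0)
            (PySem.List.pyGetD (PySem.List.sorted pr.2 (fun x => x)) 1 0 + 1)) with
      | some j => ary ++ [j]
      | none => ary) acc l
    = acc ++ l.filterMap (fA ts) := by
  induction l generalizing acc with
  | nil => simp
  | cons x r ih =>
    simp only [List.foldl_cons, List.filterMap_cons]
    rcases h : fA ts x with _ | j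
    · simp only [fA] at h
      rw [ih, h]
    · simp only [fA] at h
      rw [ih, h, List.append_assoc]
      rfl

-- the enumerate/indexing view of A's rows equals the zip view of B's rows
lemma bridge (ts : List (List Int)) :
    ∀ (sc : List (List Int)) (k : Nat),
    k + sc.length ≤ ts.length →
    (∀ pr ∈ sc.zip (ts.drop k), pr.2.sum ≠ 0) →
    (PySem.List.enumerate sc (k : Int)).filterMap (fA ts) = (sc.zip (ts.drop k)).filterMap candRow := by
  intro sc
  induction sc with
  | nil => intro k _ _; simp [PySem.List.enumerate]
  | cons x r ih =>
    intro k hlen hsum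
    simp only [List.length_cons] at hlen
    have hk : k < ts.length := by omega
    have hdrop : ts.drop k = ts[k] :: ts.drop (k + 1) := List.drop_eq_getElem_cons hk
    have henum : PySem.List.enumerate (x :: r) (k : Int)
        = ((k : Int), x) :: PySem.List.enumerate r ((k : Int) + 1) := rfl
    have hget : PySem.List.pyGetD ts (k : Int) [] = ts[k] := by
      rw [PySem.List.pyGetD_eq_getElem ts [] (by omega) (by exact_mod_cast hk)]
      simp
    have hhead : fA ts ((k : Int), x) = candRow (x, ts[k]) := by
      simp only [fA, candRow, hget]
      exact rowEq _ _ _ _ (by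
        have hm : (x, ts[k]) ∈ (x :: r).zip (ts.drop k) := by
          rw [hdrop, List.zip_cons_cons]
          exact List.mem_cons_self
        have := hsum (x, ts[k]) hm
        simpa using this)
    have hcast : ((k : Int) + 1) = ((k + 1 : Nat) : Int) := by push_cast; ring
    rw [henum, hdrop, List.zip_cons_cons, List.filterMap_cons, List.filterMap_cons, hhead, hcast,
      ih (k + 1) (by omega) (fun pr hpr => hsum pr (by
        rw [hdrop, List.zip_cons_cons]
        exact List.mem_cons_of_mem _ hpr))]

-- B's loop body, as a function of the current best and the per-row candidate
lemma optStep_if (P : Prop) [Decidable P] (b0 : Option Int) (j : Int) :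
    (if P ∧ (b0 = none ∨ j < b0.getD 0) then some j else b0)
    = match (if P then some j else none) with
      | none => b0
      | some v => if b0 = none ∨ v < b0.getD 0 then some v else b0 := by
  by_cases hP : P
  · simp only [if_pos hP]
    by_cases hQ : b0 = none ∨ j < b0.getD 0
    · rw [if_pos ⟨hP, hQ⟩, if_pos hQ]
    · rw [if_neg (fun h => hQ h.2), if_neg hQ]
  · rw [if_neg (fun h => hP h.1), if_neg hP]

lemma stepB_eq (best : Option Int) (rt : List Int × List Int) :
    (if rt.2.sum ≤ 0 then best
     else if min (PySem.List.pyGetD rt.2 0 0) (rt.2.sum - 1) ≤ 0 then best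
     else if (if 1 ≤ PySem.Int.mod (PySem.List.pyGetD (PySem.List.sorted rt.1 (fun x => x)) 0 0) rt.2.sum
                 ∧ PySem.Int.mod (PySem.List.pyGetD (PySem.List.sorted rt.1 (fun x => x)) 0 0) rt.2.sum
                   ≤ min (PySem.List.pyGetD rt.2 0 0) (rt.2.sum - 1)
              then PySem.List.pyGetD (PySem.List.sorted rt.1 (fun x => x)) 0 0
              else if PySem.Int.mod (PySem.List.pyGetD (PySem.List.sorted rt.1 (fun x => x)) 0 0) rt.2.sum = 0
              then PySem.List.pyGetD (PySem.List.sorted rt.1 (fun x => x)) 0 0 + 1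
              else PySem.List.pyGetD (PySem.List.sorted rt.1 (fun x => x)) 0 0
                   + (rt.2.sum - PySem.Int.mod (PySem.List.pyGetD (PySem.List.sorted rt.1 (fun x => x)) 0 0) rt.2.sum) + 1)
             ≤ PySem.List.pyGetD (PySem.List.sorted rt.1 (fun x => x)) 1 0
           ∧ (best = none
              ∨ (if 1 ≤ PySem.Int.mod (PySem.List.pyGetD (PySem.List.sorted rt.1 (fun x => x)) 0 0) rt.2.sum
                    ∧ PySem.Int.mod (PySem.List.pyGetD (PySem.List.sorted rt.1 (fun x => x)) 0 0) rt.2.sum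
                      ≤ min (PySem.List.pyGetD rt.2 0 0) (rt.2.sum - 1)
                 then PySem.List.pyGetD (PySem.List.sorted rt.1 (fun x => x)) 0 0
                 else if PySem.Int.mod (PySem.List.pyGetD (PySem.List.sorted rt.1 (fun x => x)) 0 0) rt.2.sum = 0
                 then PySem.List.pyGetD (PySem.List.sorted rt.1 (fun x => x)) 0 0 + 1
                 else PySem.List.pyGetD (PySem.List.sorted rt.1 (fun x => x)) 0 0
                      + (rt.2.sum - PySem.Int.mod (PySem.List.pyGetD (PySem.List.sorted rt.1 (fun x => x)) 0 0) rt.2.sum) + 1)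
                 < best.getD 0)
     then some (if 1 ≤ PySem.Int.mod (PySem.List.pyGetD (PySem.List.sorted rt.1 (fun x => x)) 0 0) rt.2.sum
                   ∧ PySem.Int.mod (PySem.List.pyGetD (PySem.List.sorted rt.1 (fun x => x)) 0 0) rt.2.sum
                     ≤ min (PySem.List.pyGetD rt.2 0 0) (rt.2.sum - 1)
                then PySem.List.pyGetD (PySem.List.sorted rt.1 (fun x => x)) 0 0
                else if PySem.Int.mod (PySem.List.pyGetD (PySem.List.sorted rt.1 (fun x => x)) 0 0) rt.2.sum = 0
                then PySem.List.pyGetD (PySem.List.sorted rt.1 (fun x => x)) 0 0 + 1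
                else PySem.List.pyGetD (PySem.List.sorted rt.1 (fun x => x)) 0 0
                     + (rt.2.sum - PySem.Int.mod (PySem.List.pyGetD (PySem.List.sorted rt.1 (fun x => x)) 0 0) rt.2.sum) + 1)
     else best)
    = (match candRow rt with
       | none => best
       | some j => if best = none ∨ j < best.getD 0 then some j else best) := by
  simp only [candRow, candB]
  by_cases h1 : rt.2.sum ≤ 0
  · simp only [if_pos h1]
  · simp only [if_neg h1]
    by_cases h2 : min (PySem.List.pyGetD rt.2 0 0) (rt.2.sum - 1) ≤ 0
    · simp only [if_pos h2]
    · simp only [if_neg h2]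
      exact optStep_if _ best _

-- B's loop is a running minimum over the per-row candidates
lemma foldB (l : List (List Int × List Int)) (acc : Option Int) :
    List.foldl (fun best rt =>
      if rt.2.sum ≤ 0 then best
      else if min (PySem.List.pyGetD rt.2 0 0) (rt.2.sum - 1) ≤ 0 then best
      else if (if 1 ≤ PySem.Int.mod (PySem.List.pyGetD (PySem.List.sorted rt.1 (fun x => x)) 0 0) rt.2.sum
                  ∧ PySem.Int.mod (PySem.List.pyGetD (PySem.List.sorted rt.1 (fun x => x)) 0 0) rt.2.sum
                    ≤ min (PySem.List.pyGetD rt.2 0 0) (rt.2.sum - 1)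
               then PySem.List.pyGetD (PySem.List.sorted rt.1 (fun x => x)) 0 0
               else if PySem.Int.mod (PySem.List.pyGetD (PySem.List.sorted rt.1 (fun x => x)) 0 0) rt.2.sum = 0
               then PySem.List.pyGetD (PySem.List.sorted rt.1 (fun x => x)) 0 0 + 1
               else PySem.List.pyGetD (PySem.List.sorted rt.1 (fun x => x)) 0 0
                    + (rt.2.sum - PySem.Int.mod (PySem.List.pyGetD (PySem.List.sorted rt.1 (fun x => x)) 0 0) rt.2.sum) + 1)
              ≤ PySem.List.pyGetD (PySem.List.sorted rt.1 (fun x => x)) 1 0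
            ∧ (best = none
               ∨ (if 1 ≤ PySem.Int.mod (PySem.List.pyGetD (PySem.List.sorted rt.1 (fun x => x)) 0 0) rt.2.sum
                     ∧ PySem.Int.mod (PySem.List.pyGetD (PySem.List.sorted rt.1 (fun x => x)) 0 0) rt.2.sum
                       ≤ min (PySem.List.pyGetD rt.2 0 0) (rt.2.sum - 1)
                  then PySem.List.pyGetD (PySem.List.sorted rt.1 (fun x => x)) 0 0
                  else if PySem.Int.mod (PySem.List.pyGetD (PySem.List.sorted rt.1 (fun x => x)) 0 0) rt.2.sum = 0
                  then PySem.List.pyGetD (PySem.List.sorted rt.1 (fun x => x)) 0 0 + 1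
                  else PySem.List.pyGetD (PySem.List.sorted rt.1 (fun x => x)) 0 0
                       + (rt.2.sum - PySem.Int.mod (PySem.List.pyGetD (PySem.List.sorted rt.1 (fun x => x)) 0 0) rt.2.sum) + 1)
                  < best.getD 0)
      then some (if 1 ≤ PySem.Int.mod (PySem.List.pyGetD (PySem.List.sorted rt.1 (fun x => x)) 0 0) rt.2.sum
                    ∧ PySem.Int.mod (PySem.List.pyGetD (PySem.List.sorted rt.1 (fun x => x)) 0 0) rt.2.sum
                      ≤ min (PySem.List.pyGetD rt.2 0 0) (rt.2.sum - 1)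
                 then PySem.List.pyGetD (PySem.List.sorted rt.1 (fun x => x)) 0 0
                 else if PySem.Int.mod (PySem.List.pyGetD (PySem.List.sorted rt.1 (fun x => x)) 0 0) rt.2.sum = 0
                 then PySem.List.pyGetD (PySem.List.sorted rt.1 (fun x => x)) 0 0 + 1
                 else PySem.List.pyGetD (PySem.List.sorted rt.1 (fun x => x)) 0 0
                      + (rt.2.sum - PySem.Int.mod (PySem.List.pyGetD (PySem.List.sorted rt.1 (fun x => x)) 0 0) rt.2.sum) + 1)
      else best) acc l
    = List.foldl (fun b j => if b = none ∨ j < b.getD 0 then some j else b) acc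
        (l.filterMap candRow) := by
  induction l generalizing acc with
  | nil => simp
  | cons x r ih =>
    simp only [List.foldl_cons, List.filterMap_cons]
    rcases h : candRow x with _ | j
    · have hstep := stepB_eq acc x
      rw [h] at hstep
      rw [hstep, ih]
    · have hstep := stepB_eq acc x
      rw [h] at hstep
      rw [hstep, ih]
      rfl

-- running minimum over a plain list
lemma minFoldSome (m : List Int) :
    ∀ v : Int, List.foldl (fun b j => if b = none ∨ j < b.getD 0 then some j else b) (some v) m
      = some (List.foldl min v m) := by
  induction m with
  | nil => intro v; rfl
  | cons x t ih =>
    intro v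
    simp only [List.foldl_cons]
    by_cases hx : x < v
    · rw [if_pos (Or.inr (by simpa using hx)), ih x, show min v x = x from by omega]
    · rw [if_neg (fun hc => by
        rcases hc with hc | hc
        · exact absurd hc (by simp)
        · exact hx (by simpa using hc)), ih v, show min v x = v from by omega]

lemma minFold (m : List Int) :
    List.foldl (fun b j => if b = none ∨ j < b.getD 0 then some j else b) none m
    = match m with | [] => none | x :: t => some (List.foldl min x t) := by
  cases m with
  | nil => rfl
  | cons x t =>
    simp only [List.foldl_cons]
    rw [if_pos (Or.inl trivial)]
    exact minFoldSome t x

lemma sortedHeadMin (x : Int) (t : List Int) :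
    PySem.List.pyGetD (PySem.List.sorted (x :: t) (fun y => y)) 0 0 = List.foldl min x t := by
  have hperm := PySem.List.sorted_perm (x :: t) (fun y => y) false
  have hpair := PySem.List.sorted_pairwise (x :: t) (fun y => y)
  rcases hs : PySem.List.sorted (x :: t) (fun y => y) with _ | ⟨s0, s'⟩
  · exact absurd (hperm.length_eq) (by rw [hs]; simp)
  · rw [hs] at hperm hpair
    have hhead : PySem.List.pyGetD (s0 :: s') 0 0 = s0 := by
      rw [PySem.List.pyGetD_ofNat']; rfl
    rw [hhead]
    have hmono := (List.pairwise_cons.mp hpair).1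
    have hminmem : List.foldl min x t ∈ x :: t := by
      rcases PySem.List.foldl_min_mem t x with h | h
      · rw [h]; simp
      · simp [h]
    have hminle := PySem.List.foldl_min_le t x
    have h1 : s0 ≤ List.foldl min x t := by
      have hmem : List.foldl min x t ∈ s0 :: s' := hperm.mem_iff.mpr hminmem
      rcases hmem with _ | ⟨_, hmem⟩
      · omega
      · exact hmono _ hmem
    have h2 : List.foldl min x t ≤ s0 := by
      have hs0mem : s0 ∈ x :: t := hperm.subset List.mem_cons_self
      rcases hs0mem with _ | ⟨_, hmem⟩
      · have := hminle.1; omega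
      · exact hminle.2 _ hmem
    omega

-- ===== VERDICT (by name: the statement is the Claim_ definition above) =====
theorem solution_spec : Claim_equal_solution := by
  intro d sc ts _ hpre
  obtain ⟨hlen, hrows⟩ := hpre
  show solution d sc ts = solution_alt d sc ts
  simp only [solution, solution_alt]
  rw [foldA, foldB, minFold]
  rw [show PySem.List.enumerate sc 0 = PySem.List.enumerate sc ((0 : Nat) : Int) by norm_num]
  rw [bridge ts sc 0 (by omega) (by
    intro pr hpr
    rw [List.drop_zero] at hpr
    exact (hrows pr hpr).2)]
  rw [List.drop_zero, List.nil_append]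
  cases hcl : (sc.zip ts).filterMap candRow with
  | nil => simp
  | cons x t =>
    rw [if_neg (by simp)]
    exact sortedHeadMin x t
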